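-- pv_equiv track=rewrite | github.com/AleVlaKon/algorytm | 6/6.4.5.py | steps_to_max
-- ===== SOURCE A (Python) =====
-- def steps_to_max(nums: list[int]) -> int:
--     max_element = nums[0]
--     count = 1
--     result = 0
--     for i in range(1, len(nums)):
--         diff = abs(max_element - nums[i])
--         if nums[i] > max_element:
--             max_element = nums[i]
--             result += diff * count
--         else:
--             result += diff
--         count += 1
--
--     return result
-- ===== SOURCE B (Python) =====
-- def steps_to_max(nums: list[int]) -> int:
--     top = nums[0]
--     for x in nums:
--         if x > top:
--             top = x
--     return len(nums) * top - sum(nums)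
-- ===== Notes on version B (the rewrite author's own statement) =====
-- stated objective: simpler
-- what changed: Replaces A's incremental weighted-difference accumulation (running max, count, abs diffs) with the algebraic closed form len(nums)*max - sum(nums), the max found by one plain loop seeded from nums[0].
import Mathlib
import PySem

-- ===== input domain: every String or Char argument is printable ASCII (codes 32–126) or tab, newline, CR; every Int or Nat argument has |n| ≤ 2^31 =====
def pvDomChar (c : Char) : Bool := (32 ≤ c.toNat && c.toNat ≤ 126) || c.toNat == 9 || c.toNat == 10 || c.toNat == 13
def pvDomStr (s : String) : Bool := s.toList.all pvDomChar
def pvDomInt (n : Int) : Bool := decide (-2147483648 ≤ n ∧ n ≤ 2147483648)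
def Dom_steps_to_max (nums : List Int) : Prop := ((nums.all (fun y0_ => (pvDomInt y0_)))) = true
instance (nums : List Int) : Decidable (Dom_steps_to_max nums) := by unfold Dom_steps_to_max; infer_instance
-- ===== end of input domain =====

-- B replaces A's incremental weighted-difference accumulation with the closed form len*max - sum (simpler, same O(n)).


-- ===== PORT A =====
-- the loop body of A: state = (max_element, count, result); iterating nums[1:] is range(1, len(nums)) with nums[i]
def stepsLoopA : List Int → Int → Int → Int → Int
  | [], _, _, result => result
  | x :: rest, maxElement, count, result =>
    let diff := |maxElement - x|
    if x > maxElement then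
      stepsLoopA rest x (count + 1) (result + diff * count)
    else
      stepsLoopA rest maxElement (count + 1) (result + diff)

def steps_to_max (nums : List Int) : Int :=
  match nums with
  | [] => 0          -- A raises IndexError on nums[0]; excluded by Pre_steps_to_max
  | h :: rest => stepsLoopA rest h 1 0

-- ===== PORT B =====
-- B's max loop: top = nums[0]; for x in nums: if x > top: top = x
def topLoopB : List Int → Int → Int
  | [], top => top
  | x :: rest, top => topLoopB rest (if x > top then x else top)

def steps_to_max_alt (nums : List Int) : Int :=
  match nums with
  | [] => 0          -- B raises IndexError on nums[0]; excluded by Pre_steps_to_max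
  | h :: _ => (nums.length : Int) * topLoopB nums h - nums.sum

-- ===== PRECONDITION & SPEC =====
-- Pre_ excludes the empty list, on which both A and B raise IndexError (nums[0]).
def Pre_steps_to_max (nums : List Int) : Prop := nums ≠ []
instance (nums : List Int) : Decidable (Pre_steps_to_max nums) := by unfold Pre_steps_to_max; infer_instance
def pvWitness_steps_to_max : List Int := [3, 1, 4]

def Spec_steps_to_max (nums : List Int) (out : Int) : Prop := out = steps_to_max_alt nums
instance (nums : List Int) (out : Int) : Decidable (Spec_steps_to_max nums out) := by unfold Spec_steps_to_max; infer_instance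

-- ===== CLAIM (what is proved, stated in full; the proofs are below) =====
def Claim_equal_steps_to_max : Prop := ∀ (nums : List Int), Dom_steps_to_max nums → Pre_steps_to_max nums → Spec_steps_to_max nums (steps_to_max nums)

-- ===== LEMMAS AND PROOFS =====

-- invariant of A's loop: result accumulates exactly (count + |rest|)·max − count·m − sum rest
theorem stepsLoopA_closed (rest : List Int) : ∀ (m c r : Int),
    stepsLoopA rest m c r = r + (c + rest.length) * topLoopB rest m - c * m - rest.sum := by
  induction rest with
  | nil => intro m c r; simp [stepsLoopA, topLoopB]
  | cons x t ih =>
    intro m c r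
    by_cases h : x > m
    · have habs : |m - x| = x - m := by rw [abs_sub_comm]; exact abs_of_pos (by omega)
      simp only [stepsLoopA, topLoopB, if_pos h, habs, ih]
      push_cast [List.length_cons, List.sum_cons]
      ring
    · have habs : |m - x| = m - x := abs_of_nonneg (by omega)
      simp only [stepsLoopA, topLoopB, if_neg h, habs, ih]
      push_cast [List.length_cons, List.sum_cons]
      ring

-- ===== VERDICT (by name: the statement is the Claim_ definition above) =====
theorem steps_to_max_spec : Claim_equal_steps_to_max := by
  intro nums _ hpre
  match nums with
  | [] => exact absurd rfl hpre
  | h :: t =>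
    show steps_to_max (h :: t) = steps_to_max_alt (h :: t)
    simp only [steps_to_max, steps_to_max_alt, stepsLoopA_closed, topLoopB, lt_irrefl,
      List.length_cons, List.sum_cons]
    push_cast
    ring
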